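-- pv_equiv track=rewrite | github.com/cyphou/MicroStrategyToPowerBI | powerbi_import/pbip_generator.py | _has_date_dimension_table
-- ===== SOURCE A (Python) =====
-- _DATE_DIM_PATTERNS = {"date", "calendar", "time", "period"}
--
-- def _has_date_dimension_table(data):
--     """Check if a dedicated date dimension/lookup table already exists.
--
--     Detects tables with names like LU_DATE, DIM_DATE, DIM_CALENDAR, etc.
--     These tables already provide date hierarchy columns, making an
--     auto-generated Calendar table redundant.
--     """
--     for ds in data.get("datasources", []):
--         name = ds.get("name", "").upper()
--         # Strip common prefixes to get the core name
--         for prefix in ("LU_", "DIM_", "D_", "LOOKUP_", "DIM"):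
--             if name.startswith(prefix):
--                 name = name[len(prefix):]
--                 break
--         if name.lower() in _DATE_DIM_PATTERNS:
--             return True
--     return False
-- ===== SOURCE B (Python) =====
-- _DATE_DIM_PATTERNS = {"date", "calendar", "time", "period"}
--
-- # All uppercased table names the detector accepts: every (possibly empty)
-- # known prefix glued to every date-dimension pattern.
-- _ACCEPTED_NAMES = {
--     prefix + pattern.upper()
--     for prefix in ("", "LU_", "DIM_", "D_", "LOOKUP_", "DIM")
--     for pattern in _DATE_DIM_PATTERNS
-- }
--
--
-- def _has_date_dimension_table(data):
--     """Check if a dedicated date dimension/lookup table already exists."""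
--     return any(
--         ds.get("name", "").upper() in _ACCEPTED_NAMES
--         for ds in data.get("datasources", [])
--     )
-- ===== Notes on version B (the rewrite author's own statement) =====
-- stated objective: simpler
-- what changed: The per-name ordered prefix-stripping inner loop plus lower-case pattern test is replaced by a single membership test of the uppercased name against a precomputed module-level set of all 24 acceptable full names (prefix x pattern cross-product, including the empty prefix), and the outer loop becomes one any(...) expression.
import Mathlib
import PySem

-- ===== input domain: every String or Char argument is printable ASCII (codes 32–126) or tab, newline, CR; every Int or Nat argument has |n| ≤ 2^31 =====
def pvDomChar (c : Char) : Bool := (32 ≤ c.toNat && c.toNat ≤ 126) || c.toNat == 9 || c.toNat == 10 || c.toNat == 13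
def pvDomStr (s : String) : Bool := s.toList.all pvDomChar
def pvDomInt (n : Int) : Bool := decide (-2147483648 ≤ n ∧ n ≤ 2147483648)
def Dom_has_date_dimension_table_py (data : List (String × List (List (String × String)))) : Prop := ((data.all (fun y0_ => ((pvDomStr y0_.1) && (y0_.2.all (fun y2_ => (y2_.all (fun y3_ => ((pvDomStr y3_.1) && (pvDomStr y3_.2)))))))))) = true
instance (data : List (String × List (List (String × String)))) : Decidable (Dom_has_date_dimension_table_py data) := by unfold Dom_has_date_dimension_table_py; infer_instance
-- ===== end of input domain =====

-- B replaces A's per-name ordered prefix-stripping inner loop by one membership test of the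
-- uppercased name against a precomputed set of all acceptable full names (simpler, one pass).

set_option maxRecDepth 8000


-- ===== PORT A =====
-- _DATE_DIM_PATTERNS = {"date", "calendar", "time", "period"}  (a set of distinct strings)
def pvPatterns : List String := ["date", "calendar", "time", "period"]

-- inner `for prefix in (...): if name.startswith(prefix): name = name[len(prefix):]; break`
def pvStripPrefix : List String → String → String
  | [], name => name
  | p :: ps, name =>
      if PySem.Str.startswith name p then PySem.Str.slice name (some (PySem.Str.len p)) none
      else pvStripPrefix ps name

-- outer `for ds in ...: ... if name.lower() in _DATE_DIM_PATTERNS: return True` / `return False`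
def pvLoopA : List (List (String × String)) → Bool
  | [] => false
  | ds :: rest =>
      let name := PySem.Str.upper ((PySem.Dict.mk ds).getD "name" "")
      let name := pvStripPrefix ["LU_", "DIM_", "D_", "LOOKUP_", "DIM"] name
      if pvPatterns.contains (PySem.Str.lower name) then true else pvLoopA rest

def has_date_dimension_table_py (data : List (String × List (List (String × String)))) : Bool :=
  pvLoopA ((PySem.Dict.mk data).getD "datasources" [])

-- ===== PORT B =====
-- _ACCEPTED_NAMES = {prefix + pattern.upper() for prefix in (...) for pattern in _DATE_DIM_PATTERNS}
def pvAccepted : PySem.Set String :=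
  PySem.Set.ofList
    ((["", "LU_", "DIM_", "D_", "LOOKUP_", "DIM"]).flatMap
      (fun p => pvPatterns.map (fun pat => p ++ PySem.Str.upper pat)))

def has_date_dimension_table_py_alt (data : List (String × List (List (String × String)))) : Bool :=
  ((PySem.Dict.mk data).getD "datasources" []).any
    (fun ds => pvAccepted.contains (PySem.Str.upper ((PySem.Dict.mk ds).getD "name" "")))

-- ===== PRECONDITION & SPEC =====
def Spec_has_date_dimension_table_py (data : List (String × List (List (String × String)))) (out : Bool) : Prop := out = has_date_dimension_table_py_alt data
instance (data : List (String × List (List (String × String)))) (out : Bool) : Decidable (Spec_has_date_dimension_table_py data out) := by unfold Spec_has_date_dimension_table_py; infer_instance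

-- ===== CLAIM (what is proved, stated in full; the proofs are below) =====
def Claim_equal_has_date_dimension_table_py : Prop := ∀ (data : List (String × List (List (String × String)))), Dom_has_date_dimension_table_py data → Spec_has_date_dimension_table_py data (has_date_dimension_table_py data)

-- ===== LEMMAS AND PROOFS =====

theorem char_eq_of_toNat {a b : Char} (h : a.toNat = b.toNat) : a = b :=
  Char.ext (UInt32.toNat_inj.mp h)

theorem toNat_upperChar (c : Char) :
    (PySem.Chars.upperChar c).toNat = if 97 ≤ c.toNat ∧ c.toNat ≤ 122 then c.toNat - 32 else c.toNat := by
  simp only [PySem.Chars.upperChar, PySem.Chars.islower, Bool.and_eq_true, decide_eq_true_eq]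
  have h1 : ('a' ≤ c ∧ c ≤ 'z') ↔ (97 ≤ c.toNat ∧ c.toNat ≤ 122) := Iff.rfl
  split_ifs with ha hb hb
  · rw [Char.toNat_ofNat, if_pos (Or.inl (by have := h1.mp ha; omega))]
  · exact absurd (h1.mp ha) hb
  · exact absurd (h1.mpr hb) ha
  · rfl

theorem toNat_lowerChar (c : Char) :
    (PySem.Chars.lowerChar c).toNat = if 65 ≤ c.toNat ∧ c.toNat ≤ 90 then c.toNat + 32 else c.toNat := by
  simp only [PySem.Chars.lowerChar, PySem.Chars.isupper, Bool.and_eq_true, decide_eq_true_eq]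
  have h1 : ('A' ≤ c ∧ c ≤ 'Z') ↔ (65 ≤ c.toNat ∧ c.toNat ≤ 90) := Iff.rfl
  split_ifs with ha hb hb
  · rw [Char.toNat_ofNat, if_pos (Or.inl (by have := h1.mp ha; omega))]
  · exact absurd (h1.mp ha) hb
  · exact absurd (h1.mpr hb) ha
  · rfl

theorem upperChar_idem (c : Char) :
    PySem.Chars.upperChar (PySem.Chars.upperChar c) = PySem.Chars.upperChar c := by
  apply char_eq_of_toNat
  have h1 := toNat_upperChar c
  rw [toNat_upperChar, h1]
  split_ifs <;> omega

theorem upperChar_lowerChar (c : Char) (h : PySem.Chars.upperChar c = c) :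
    PySem.Chars.upperChar (PySem.Chars.lowerChar c) = c := by
  have hh := congrArg Char.toNat h
  rw [toNat_upperChar] at hh
  have hn : ¬ (97 ≤ c.toNat ∧ c.toNat ≤ 122) := by
    intro hc; rw [if_pos hc] at hh; omega
  apply char_eq_of_toNat
  have h1 := toNat_lowerChar c
  rw [toNat_upperChar, h1]
  split_ifs <;> omega

-- a char-fixed list is recovered from its lowering by uppering
theorem map_lower_fixed (t : List Char) (P : List Char)
    (hfix : ∀ u ∈ t, PySem.Chars.upperChar u = u)
    (h : List.map PySem.Chars.lowerChar t = P) :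
    t = List.map PySem.Chars.upperChar P := by
  induction t generalizing P with
  | nil => simp_all
  | cons u t' ih =>
      subst h
      simp only [List.map_cons, List.map_map]
      rw [List.cons_eq_cons]
      refine ⟨(upperChar_lowerChar u (hfix u (by simp))).symm, ?_⟩
      have := ih (List.map PySem.Chars.lowerChar t') (fun v hv => hfix v (by simp [hv])) rfl
      simpa using this

-- every char of an uppercased string is fixed by upperChar
theorem fixed_of_upper (s : String) :
    ∀ u ∈ (PySem.Str.upper s).toList, PySem.Chars.upperChar u = u := by
  intro u hu
  rw [PySem.Str.toList_upper] at hu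
  simp only [PySem.Chars.upper, List.mem_map] at hu
  obtain ⟨d, _, rfl⟩ := hu
  exact upperChar_idem d

-- if N is a concrete prefix glued to the uppercasing of a pattern, N is an accepted name
theorem mem_accepted (N pref pats : String)
    (hpref : pref ∈ (["", "LU_", "DIM_", "D_", "LOOKUP_", "DIM"] : List String))
    (hpats : pats ∈ pvPatterns)
    (heq : N.toList = pref.toList ++ List.map PySem.Chars.upperChar pats.toList) :
    N ∈ pvAccepted := by
  rw [pvAccepted, PySem.Set.mem_ofList, List.mem_flatMap]
  refine ⟨pref, hpref, ?_⟩
  rw [List.mem_map]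
  refine ⟨pats, hpats, ?_⟩
  apply String.toList_inj.mp
  rw [String.toList_append, PySem.Str.toList_upper]
  simpa [PySem.Chars.upper] using heq.symm

-- splitting N at a known prefix with a pattern remainder gives an accepted name
theorem from_split (N pref S : String)
    (hpref : pref ∈ (["", "LU_", "DIM_", "D_", "LOOKUP_", "DIM"] : List String))
    (hfix : ∀ u ∈ N.toList, PySem.Chars.upperChar u = u)
    (hsp : N.toList = pref.toList ++ S.toList)
    (hc : pvPatterns.contains (PySem.Str.lower S) = true) :
    N ∈ pvAccepted := by
  have hfixS : ∀ u ∈ S.toList, PySem.Chars.upperChar u = u := by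
    intro u hu
    exact hfix u (by rw [hsp]; exact List.mem_append_right _ hu)
  have key : ∀ pats : String, PySem.Str.lower S = pats →
      S.toList = List.map PySem.Chars.upperChar pats.toList := by
    intro pats hp
    refine map_lower_fixed S.toList pats.toList hfixS ?_
    have := congrArg String.toList hp
    simpa [PySem.Str.toList_lower, PySem.Chars.lower] using this
  simp only [pvPatterns, List.contains_iff_mem, List.mem_cons, List.not_mem_nil, or_false] at hc
  rcases hc with h | h | h | h
  · exact mem_accepted N pref "date" hpref (by simp [pvPatterns]) (by rw [hsp, key "date" h])
  · exact mem_accepted N pref "calendar" hpref (by simp [pvPatterns]) (by rw [hsp, key "calendar" h])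
  · exact mem_accepted N pref "time" hpref (by simp [pvPatterns]) (by rw [hsp, key "time" h])
  · exact mem_accepted N pref "period" hpref (by simp [pvPatterns]) (by rw [hsp, key "period" h])

-- the stripped slice: toList of name[len(p):] is drop
theorem toList_strip_slice (N p : String) :
    (PySem.Str.slice N (some (PySem.Str.len p)) none).toList = N.toList.drop p.toList.length := by
  rw [PySem.Str.toList_slice, PySem.Chars.slice_eq_listSlice]
  have hlen : PySem.Str.len p = (p.toList.length : Int) := by
    simp [PySem.Str.len_eq]
  rw [hlen, PySem.List.slice_from _ (by positivity)]
  simp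

-- a fired startswith branch gives an accepted name
theorem from_branch (N pref : String)
    (hpref : pref ∈ (["", "LU_", "DIM_", "D_", "LOOKUP_", "DIM"] : List String))
    (hfix : ∀ u ∈ N.toList, PySem.Chars.upperChar u = u)
    (h1 : PySem.Str.startswith N pref = true)
    (hc : pvPatterns.contains (PySem.Str.lower (PySem.Str.slice N (some (PySem.Str.len pref)) none)) = true) :
    N ∈ pvAccepted := by
  have hp : pref.toList <+: N.toList := by
    rw [← PySem.Chars.startswith_iff, ← PySem.Str.startswith_eq]
    exact h1
  obtain ⟨t, ht⟩ := hp
  have hsp : N.toList = pref.toList ++ (PySem.Str.slice N (some (PySem.Str.len pref)) none).toList := by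
    rw [toList_strip_slice, ← ht, List.drop_left]
  exact from_split N pref _ hpref hfix hsp hc

-- pvAccepted computed out
theorem accepted_lit : pvAccepted = ["DATE","CALENDAR","TIME","PERIOD","LU_DATE","LU_CALENDAR","LU_TIME","LU_PERIOD","DIM_DATE","DIM_CALENDAR","DIM_TIME","DIM_PERIOD","D_DATE","D_CALENDAR","D_TIME","D_PERIOD","LOOKUP_DATE","LOOKUP_CALENDAR","LOOKUP_TIME","LOOKUP_PERIOD","DIMDATE","DIMCALENDAR","DIMTIME","DIMPERIOD"] := by
  decide

-- the per-name checks agree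
theorem elem_eq (s : String) :
    (pvPatterns.contains (PySem.Str.lower
        (pvStripPrefix ["LU_", "DIM_", "D_", "LOOKUP_", "DIM"] (PySem.Str.upper s))))
      = pvAccepted.contains (PySem.Str.upper s) := by
  set N := PySem.Str.upper s with hN
  have hfix : ∀ u ∈ N.toList, PySem.Chars.upperChar u = u := fixed_of_upper s
  clear_value N
  rw [Bool.eq_iff_iff]
  have hacc : (pvAccepted.contains N = true) ↔ N ∈ pvAccepted := List.contains_iff_mem
  rw [hacc]
  constructor
  · intro hc
    cases h1 : PySem.Str.startswith N "LU_" with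
    | true =>
        refine from_branch N "LU_" (by simp) hfix h1 ?_
        simpa only [pvStripPrefix, h1, if_true] using hc
    | false =>
    cases h2 : PySem.Str.startswith N "DIM_" with
    | true =>
        refine from_branch N "DIM_" (by simp) hfix h2 ?_
        simpa only [pvStripPrefix, h1, h2, Bool.false_eq_true, if_false, if_true] using hc
    | false =>
    cases h3 : PySem.Str.startswith N "D_" with
    | true =>
        refine from_branch N "D_" (by simp) hfix h3 ?_
        simpa only [pvStripPrefix, h1, h2, h3, Bool.false_eq_true, if_false, if_true] using hc
    | false =>
    cases h4 : PySem.Str.startswith N "LOOKUP_" with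
    | true =>
        refine from_branch N "LOOKUP_" (by simp) hfix h4 ?_
        simpa only [pvStripPrefix, h1, h2, h3, h4, Bool.false_eq_true, if_false, if_true] using hc
    | false =>
    cases h5 : PySem.Str.startswith N "DIM" with
    | true =>
        refine from_branch N "DIM" (by simp) hfix h5 ?_
        simpa only [pvStripPrefix, h1, h2, h3, h4, h5, Bool.false_eq_true, if_false, if_true] using hc
    | false =>
        refine from_split N "" N (by simp) hfix (by simp) ?_
        simpa only [pvStripPrefix, h1, h2, h3, h4, h5, Bool.false_eq_true, if_false] using hc
  · intro h
    rw [accepted_lit] at h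
    simp only [List.mem_cons, List.not_mem_nil, or_false] at h
    rcases h with rfl|rfl|rfl|rfl|rfl|rfl|rfl|rfl|rfl|rfl|rfl|rfl|rfl|rfl|rfl|rfl|rfl|rfl|rfl|rfl|rfl|rfl|rfl|rfl <;> decide

-- the outer loops agree
theorem loop_eq (l : List (List (String × String))) :
    pvLoopA l = l.any (fun ds =>
      pvAccepted.contains (PySem.Str.upper ((PySem.Dict.mk ds).getD "name" ""))) := by
  induction l with
  | nil => rfl
  | cons ds rest ih =>
      simp only [pvLoopA, List.any_cons, ← ih, elem_eq]
      rcases Bool.eq_false_or_eq_true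
          (pvAccepted.contains (PySem.Str.upper ((PySem.Dict.mk ds).getD "name" ""))) with h | h <;>
        rw [h] <;> simp

-- ===== VERDICT (by name: the statement is the Claim_ definition above) =====
theorem has_date_dimension_table_py_spec : Claim_equal_has_date_dimension_table_py := by
  intro data _
  unfold Spec_has_date_dimension_table_py has_date_dimension_table_py has_date_dimension_table_py_alt
  exact loop_eq _
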